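-- pv_equiv track=rewrite | github.com/glacial-haws/LightweightRAG | insights/t-sne-index-store.py | get_char_differences
-- ===== SOURCE A (Python) =====
-- def get_char_differences(folders: list[str], reference: str) -> str:
--     """
--     Returns the segment(s) (split by '_') in 'reference' that are different from the other folder names in 'folders'.
--     For example, for folders = ['A_token', 'A_sentence', 'A_semantic'] and reference = 'A_token', returns 'token'.
--     """
--     if reference not in folders:
--         raise ValueError("Reference folder must be in the folders list.")
--     if len(folders) < 2:
--         return ""
--     ref_parts = reference.split('_')
--     other_parts = [f.split('_') for f in folders if f != reference]
--     unique_segments: list[str] = []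
--     for i, ref_seg in enumerate(ref_parts):
--         segs_at_i = [parts[i] if i < len(parts) else None for parts in other_parts]
--         if not all(seg == ref_seg for seg in segs_at_i):
--             unique_segments.append(ref_seg)
--     return '_'.join(unique_segments)
-- ===== SOURCE B (Python) =====
-- def get_char_differences(folders: list[str], reference: str) -> str:
--     """Row-major re-implementation: one pass over the other folders maintaining a
--     boolean mask of differing segment positions, then one zip-filter join."""
--     if reference not in folders:
--         raise ValueError("Reference folder must be in the folders list.")
--     if len(folders) < 2:
--         return ""
--     ref_parts = reference.split('_')
--     mask = [False] * len(ref_parts)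
--     for f in folders:
--         if f == reference:
--             continue
--         parts = f.split('_')
--         mask = [m or (parts[i] if i < len(parts) else None) != ref_seg
--                 for i, (m, ref_seg) in enumerate(zip(mask, ref_parts))]
--     return '_'.join(seg for seg, m in zip(ref_parts, mask) if m)
-- ===== Notes on version B (the rewrite author's own statement) =====
-- stated objective: alternative
-- what changed: B reverses the traversal order: instead of A's column-major scan (for each reference segment, build and test the list of that segment across all other folders), B makes one row-major pass over the other folders maintaining a boolean mask of differing positions, then emits the masked segments with a single zip-filter join.
import Mathlib
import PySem

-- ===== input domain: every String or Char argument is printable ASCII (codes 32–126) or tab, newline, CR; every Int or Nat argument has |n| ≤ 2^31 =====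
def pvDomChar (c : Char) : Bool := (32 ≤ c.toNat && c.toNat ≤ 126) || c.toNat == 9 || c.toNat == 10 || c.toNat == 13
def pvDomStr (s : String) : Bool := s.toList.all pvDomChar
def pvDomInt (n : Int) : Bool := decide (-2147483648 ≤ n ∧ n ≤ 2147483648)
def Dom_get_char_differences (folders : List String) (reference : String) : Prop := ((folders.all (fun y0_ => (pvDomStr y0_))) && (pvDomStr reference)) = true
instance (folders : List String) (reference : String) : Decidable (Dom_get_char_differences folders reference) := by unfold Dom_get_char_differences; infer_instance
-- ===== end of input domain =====

-- B changes the traversal order (row-major over folders with a difference mask instead of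
-- A's column-major per-segment scan); same cost, proved to return the same string.

-- ===== PORT A =====
-- Literal port of A. Where the Python raises ValueError (reference not in folders) the
-- port returns "" — those inputs are excluded by Pre_get_char_differences.
def get_char_differences (folders : List String) (reference : String) : String :=
  if ¬ (folders.contains reference) then ""
  else if folders.length < 2 then ""
  else
    let ref_parts := (PySem.Str.split? reference "_").getD []
    let other_parts := (folders.filter (fun f => !(f == reference))).map
      (fun f => (PySem.Str.split? f "_").getD [])
    let unique_segments := (PySem.List.enumerate ref_parts 0).foldl
      (fun acc p =>
        let segs_at_i := other_parts.map (fun parts => PySem.List.pyGet? parts p.1)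
        if !(segs_at_i.all (fun seg => seg == some p.2)) then acc ++ [p.2] else acc) []
    PySem.Str.join "_" unique_segments

-- ===== PORT B =====
-- Literal port of Source B: fold over folders updating a Bool mask, then zip-filter-join.
def get_char_differences_alt (folders : List String) (reference : String) : String :=
  if ¬ (folders.contains reference) then ""
  else if folders.length < 2 then ""
  else
    let ref_parts := (PySem.Str.split? reference "_").getD []
    let mask := folders.foldl
      (fun (mask : List Bool) f =>
        if f == reference then mask
        else
          let parts := (PySem.Str.split? f "_").getD []
          (PySem.List.enumerate (mask.zip ref_parts) 0).map
            (fun q => q.2.1 || !(PySem.List.pyGet? parts q.1 == some q.2.2)))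
      (List.replicate ref_parts.length false)
    PySem.Str.join "_" (((ref_parts.zip mask).filter (fun q => q.2)).map (fun q => q.1))

-- ===== PRECONDITION & SPEC =====
-- Pre_ excludes exactly the inputs where Python A raises ValueError (reference not in folders).
def Pre_get_char_differences (folders : List String) (reference : String) : Prop :=
  reference ∈ folders
instance (folders : List String) (reference : String) : Decidable (Pre_get_char_differences folders reference) := by unfold Pre_get_char_differences; infer_instance
def pvWitness_get_char_differences : List String × String := (["A_token", "A_sentence"], "A_token")

def Spec_get_char_differences (folders : List String) (reference : String) (out : String) : Prop := out = get_char_differences_alt folders reference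
instance (folders : List String) (reference : String) (out : String) : Decidable (Spec_get_char_differences folders reference out) := by unfold Spec_get_char_differences; infer_instance

-- ===== CLAIM (what is proved, stated in full; the proofs are below) =====
def Claim_equal_get_char_differences : Prop := ∀ (folders : List String) (reference : String), Dom_get_char_differences folders reference → Pre_get_char_differences folders reference → Spec_get_char_differences folders reference (get_char_differences folders reference)

-- ===== LEMMAS AND PROOFS =====

-- B's per-folder mask update, written out (abbreviation for the lemmas below).
def pvUpd (rp : List String) (m : List Bool) (f : String) : List Bool :=
  (PySem.List.enumerate (m.zip rp) 0).map
    (fun q => q.2.1 || !(PySem.List.pyGet? ((PySem.Str.split? f "_").getD []) q.1 == some q.2.2))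

-- "folder f differs from rp at position i"
def pvMism (rp : List String) (f : String) (i : Nat) : Bool :=
  !(PySem.List.pyGet? ((PySem.Str.split? f "_").getD []) (i : Int) == some (rp.getD i ""))

lemma pvUpd_eq (rp : List String) (m : List Bool) (f : String) (hm : m.length = rp.length) :
    pvUpd rp m f = (List.range rp.length).map (fun i => m.getD i false || pvMism rp f i) := by
  apply List.ext_getElem
  · simp [pvUpd, hm]
  · intro j h1 h2
    simp only [pvUpd, List.getElem_map, PySem.List.getElem_enumerate, List.getElem_zip,
      List.getElem_range, pvMism]
    have hj : j < rp.length := by simpa using h2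
    rw [List.getD_eq_getElem m false (by omega), List.getD_eq_getElem rp "" hj]
    simp

lemma pvMask_inv (rp : List String) (os : List String) (m : List Bool) (hm : m.length = rp.length) :
    os.foldl (pvUpd rp) m
      = (List.range rp.length).map (fun i => m.getD i false || os.any (fun f => pvMism rp f i)) := by
  induction os generalizing m with
  | nil =>
      simp only [List.foldl_nil, List.any_nil, Bool.or_false]
      apply List.ext_getElem
      · simp [hm]
      · intro j h1 h2
        simp only [List.getElem_map, List.getElem_range]
        rw [List.getD_eq_getElem m false (by simpa [hm] using h2)]
  | cons f os ih =>
      rw [List.foldl_cons, ih _ (by simp [pvUpd_eq rp m f hm])]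
      rw [pvUpd_eq rp m f hm]
      apply List.map_congr_left
      intro i hi
      rw [List.getD_eq_getElem _ false (by simpa using hi)]
      simp [Bool.or_assoc]

-- fold with an equality guard = fold over the filtered list
lemma pvFoldl_guard {α β : Type} [BEq α] (g : β → α → β) (r : α) (l : List α) (b : β) :
    l.foldl (fun acc x => if x == r then acc else g acc x) b
      = (l.filter (fun x => !(x == r))).foldl g b := by
  induction l generalizing b with
  | nil => rfl
  | cons x l ih =>
      by_cases h : (x == r) = true <;> simp [h, ih]

-- common bridge: A's enumerate-filter-map equals B's zip-with-mask filter-map,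
-- provided the two tests agree position by position.
lemma pvBridge {α : Type} (l : List α) (s : Nat) (cond : Int × α → Bool) (c : Nat → Bool)
    (h : ∀ (k : Nat) (hk : k < l.length), cond (((s : Int) + k), l[k]) = c k) :
    ((PySem.List.enumerate l (s : Int)).filter cond).map (fun q => q.2)
      = ((l.zip ((List.range l.length).map c)).filter (fun q => q.2)).map (fun q => q.1) := by
  induction l generalizing s c with
  | nil => rfl
  | cons x l ih =>
      rw [PySem.List.enumerate_cons, List.length_cons, List.range_succ_eq_map]
      have h0 : cond ((s : Int), x) = c 0 := by simpa using h 0 (by simp)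
      have hrec := ih (s := s + 1) (c := fun k => c (k + 1)) (fun k hk => by
        have := h (k + 1) (by simpa using Nat.succ_lt_succ hk)
        simpa [add_assoc, add_comm, add_left_comm] using this)
      have hrec' : ((PySem.List.enumerate l ((s : Int) + 1)).filter cond).map (fun q => q.2)
          = ((l.zip ((List.range l.length).map (c ∘ Nat.succ))).filter (fun q => q.2)).map
              (fun q => q.1) := by
        have hcast : ((s : Int) + 1) = (((s + 1 : Nat) : Int)) := by push_cast; ring
        rw [hcast]
        simpa [Function.comp_def] using hrec
      by_cases hc0 : c 0 = true <;>
        simp [h0, hc0, hrec']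

-- main equivalence (both ports also agree on the guard branches)
lemma pvMain (folders : List String) (reference : String) :
    get_char_differences folders reference = get_char_differences_alt folders reference := by
  unfold get_char_differences get_char_differences_alt
  by_cases hc : folders.contains reference = true
  · rw [if_neg (not_not_intro hc), if_neg (not_not_intro hc)]
    by_cases hl : folders.length < 2
    · rw [if_pos hl, if_pos hl]
    · rw [if_neg hl, if_neg hl]
      dsimp only
      congr 1
      -- abbreviations (plain definitions, not `set`, so rewrites stay syntactic)
      have hA := PySem.List.foldl_append_if
        (p := fun (q : Int × String) =>
          !(((folders.filter (fun f => !(f == reference))).map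
                (fun f => (PySem.Str.split? f "_").getD [])).map
              (fun parts => PySem.List.pyGet? parts q.1)).all (fun seg => seg == some q.2))
        (f := fun (q : Int × String) => q.2)
        (PySem.List.enumerate ((PySem.Str.split? reference "_").getD []) 0) ([] : List String)
      rw [hA, List.nil_append]
      rw [pvFoldl_guard
        (g := fun (mask : List Bool) (f : String) =>
          (PySem.List.enumerate (mask.zip ((PySem.Str.split? reference "_").getD [])) 0).map
            (fun q => q.2.1 ||
              !(PySem.List.pyGet? ((PySem.Str.split? f "_").getD []) q.1 == some q.2.2)))
        reference folders
        (List.replicate ((PySem.Str.split? reference "_").getD []).length false)]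
      have hg : (fun (mask : List Bool) (f : String) =>
          (PySem.List.enumerate (mask.zip ((PySem.Str.split? reference "_").getD [])) 0).map
            (fun q => q.2.1 ||
              !(PySem.List.pyGet? ((PySem.Str.split? f "_").getD []) q.1 == some q.2.2)))
          = pvUpd ((PySem.Str.split? reference "_").getD []) := rfl
      rw [hg,
        pvMask_inv ((PySem.Str.split? reference "_").getD [])
          (folders.filter (fun f => !(f == reference)))
          (List.replicate ((PySem.Str.split? reference "_").getD []).length false) (by simp)]
      have hmask : (List.range ((PySem.Str.split? reference "_").getD []).length).map
          (fun i => (List.replicate ((PySem.Str.split? reference "_").getD []).length false).getD i false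
            || (folders.filter (fun f => !(f == reference))).any
                (fun f => pvMism ((PySem.Str.split? reference "_").getD []) f i))
          = (List.range ((PySem.Str.split? reference "_").getD []).length).map
              (fun i => (folders.filter (fun f => !(f == reference))).any
                (fun f => pvMism ((PySem.Str.split? reference "_").getD []) f i)) := by
        apply List.map_congr_left
        intro i hi
        rw [List.getD_replicate false (by simpa using hi)]
        simp
      rw [hmask]
      have hb := pvBridge ((PySem.Str.split? reference "_").getD []) 0
        (fun (q : Int × String) =>
          !(((folders.filter (fun f => !(f == reference))).map
                (fun f => (PySem.Str.split? f "_").getD [])).map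
              (fun parts => PySem.List.pyGet? parts q.1)).all (fun seg => seg == some q.2))
        (fun i => (folders.filter (fun f => !(f == reference))).any
          (fun f => pvMism ((PySem.Str.split? reference "_").getD []) f i))
        (by
          intro k hk
          simp only [List.map_map, List.all_map, Nat.cast_zero, zero_add, pvMism]
          rw [List.getD_eq_getElem ((PySem.Str.split? reference "_").getD []) "" hk]
          simp [List.any_eq_not_all_not])
      simpa using hb
  · rw [if_pos hc, if_pos hc]

-- ===== VERDICT (by name: the statement is the Claim_ definition above) =====
theorem get_char_differences_spec : Claim_equal_get_char_differences := by
  intro folders reference _ _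
  unfold Spec_get_char_differences
  exact pvMain folders reference
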